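-- pv_equiv track=rewrite | github.com/sunnirvana/py-checkio | checkio_solutions/Escher/the_ship_teams.py | two_teams
-- ===== SOURCE A (Python) =====
-- def two_teams(sailors):
--     ship_1 = []
--     ship_2 = []
--     #replace this for solution
--     for name, age in sailors.items():
--         if 20 <= age <= 40:
--             ship_2.append(name)
--         else:
--             ship_1.append(name)
--     return [
--         sorted(ship_1),
--         sorted(ship_2)
--     ]
-- ===== SOURCE B (Python) =====
-- def two_teams(sailors):
--     tagged = sorted((20 <= age <= 40, name) for name, age in sailors.items())
--     k = sum(1 for flag, _ in tagged if not flag)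
--     return [[name for _, name in tagged[:k]], [name for _, name in tagged[k:]]]
-- ===== Notes on version B (the rewrite author's own statement) =====
-- stated objective: alternative
-- what changed: B tags each name with its team flag, performs ONE lexicographic sort of the (flag, name) pairs, then splits the single sorted list at the counted flag boundary and strips the tags, instead of A's partition-into-two-lists loop followed by two separate sorts.
import Mathlib
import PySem

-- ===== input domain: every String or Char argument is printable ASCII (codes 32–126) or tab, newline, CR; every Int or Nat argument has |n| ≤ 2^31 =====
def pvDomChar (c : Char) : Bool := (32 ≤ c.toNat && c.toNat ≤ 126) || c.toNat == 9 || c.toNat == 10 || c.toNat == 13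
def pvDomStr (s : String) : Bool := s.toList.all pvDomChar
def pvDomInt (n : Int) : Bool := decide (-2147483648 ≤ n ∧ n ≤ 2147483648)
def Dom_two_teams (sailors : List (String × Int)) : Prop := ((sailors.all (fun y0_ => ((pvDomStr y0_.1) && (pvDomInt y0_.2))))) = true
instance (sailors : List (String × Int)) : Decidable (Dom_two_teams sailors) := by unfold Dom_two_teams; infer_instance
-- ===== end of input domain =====

-- B tags each name with its team flag, sorts the tagged pairs once lexicographically, and splits the
-- single sorted list at the flag boundary — one composite-key sort instead of A's partition + two sorts.

-- ===== PORT A =====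
def two_teams (sailors : List (String × Int)) : List (List String) :=
  let items := (PySem.Dict.ofList sailors).items
  let r := items.foldl
    (fun (s : List String × List String) nv =>
      if 20 ≤ nv.2 ∧ nv.2 ≤ 40 then (s.1, s.2 ++ [nv.1]) else (s.1 ++ [nv.1], s.2))
    ([], [])
  [PySem.List.sorted r.1 (fun x => x) false, PySem.List.sorted r.2 (fun x => x) false]

-- ===== PORT B =====
-- Python's tuple comparison on (bool, str) is the lexicographic product order: key = toLex.
def two_teams_alt (sailors : List (String × Int)) : List (List String) :=
  let tagged := PySem.List.sorted
    ((PySem.Dict.ofList sailors).items.map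
      (fun nv => (decide (20 ≤ nv.2 ∧ nv.2 ≤ 40), nv.1)))
    (fun p => toLex p) false
  let k : Int := ((tagged.filter (fun p => !p.1)).map (fun _ => (1 : Int))).sum
  [(PySem.List.slice tagged none (some k)).map Prod.snd,
   (PySem.List.slice tagged (some k) none).map Prod.snd]

-- ===== PRECONDITION & SPEC =====
def Spec_two_teams (sailors : List (String × Int)) (out : List (List String)) : Prop := out = two_teams_alt sailors
instance (sailors : List (String × Int)) (out : List (List String)) : Decidable (Spec_two_teams sailors out) := by unfold Spec_two_teams; infer_instance

-- ===== CLAIM =====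
def Claim_equal_two_teams : Prop := ∀ (sailors : List (String × Int)), Dom_two_teams sailors → Spec_two_teams sailors (two_teams sailors)

-- ===== LEMMAS AND PROOFS =====

-- A's partition loop equals two filters over the items
lemma two_teams_foldA (P : String × Int → Prop) [DecidablePred P] (l : List (String × Int))
    (a b : List String) :
    l.foldl
      (fun (s : List String × List String) nv =>
        if P nv then (s.1, s.2 ++ [nv.1]) else (s.1 ++ [nv.1], s.2))
      (a, b)
    = (a ++ ((l.filter (fun p => decide (¬ P p))).map Prod.fst),
       b ++ ((l.filter (fun p => decide (P p))).map Prod.fst)) := by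
  induction l generalizing a b with
  | nil => simp
  | cons x t ih =>
    by_cases h : P x <;> simp [h, ih]

-- a sorted Nodup String list is strictly increasing
lemma two_teams_pairwise_lt (xs : List String) (h : xs.Nodup) :
    (PySem.List.sorted xs (fun x => x) false).Pairwise (· < ·) := by
  have hle := PySem.List.sorted_pairwise (xs := xs) (key := fun x => x)
  have hnd : (PySem.List.sorted xs (fun x => x) false).Nodup :=
    (PySem.List.sorted_perm (xs := xs) (key := fun x => x) (rev := false)).nodup_iff.mpr h
  exact (hnd.and hle).imp (fun hp => lt_of_le_of_ne hp.2 hp.1)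

-- the lexicographic sort of the tagged items is (sorted false-group) ++ (sorted true-group)
lemma two_teams_sorted_tagged (items : List (String × Int))
    (hnd : (items.map Prod.fst).Nodup) :
    PySem.List.sorted
      (items.map (fun nv => (decide (20 ≤ nv.2 ∧ nv.2 ≤ 40), nv.1)))
      (fun p => toLex p) false
    = (PySem.List.sorted ((items.filter (fun p => decide (¬ (20 ≤ p.2 ∧ p.2 ≤ 40)))).map Prod.fst)
        (fun x => x) false).map (fun n => (false, n))
      ++ (PySem.List.sorted ((items.filter (fun p => decide (20 ≤ p.2 ∧ p.2 ≤ 40))).map Prod.fst)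
        (fun x => x) false).map (fun n => (true, n)) := by
  set N1 := (items.filter (fun p => decide (¬ (20 ≤ p.2 ∧ p.2 ≤ 40)))).map Prod.fst with hN1
  set N2 := (items.filter (fun p => decide (20 ≤ p.2 ∧ p.2 ≤ 40))).map Prod.fst with hN2
  have hnd1 : N1.Nodup := by
    rw [hN1]; exact hnd.sublist (List.filter_sublist.map Prod.fst)
  have hnd2 : N2.Nodup := by
    rw [hN2]; exact hnd.sublist (List.filter_sublist.map Prod.fst)
  apply PySem.List.sorted_eq_of_perm_of_pairwise_lt
  · -- permutation
    have hq : (fun x : String × Int => !decide (¬ (20 ≤ x.2 ∧ x.2 ≤ 40)))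
        = (fun x : String × Int => decide (20 ≤ x.2 ∧ x.2 ≤ 40)) := by
      funext x; by_cases h : 20 ≤ x.2 ∧ x.2 ≤ 40 <;> simp [h]
    have h1 : ((items.filter (fun p => decide (¬ (20 ≤ p.2 ∧ p.2 ≤ 40))))
        ++ (items.filter (fun p => decide (20 ≤ p.2 ∧ p.2 ≤ 40)))).Perm items := by
      have h0 := List.filter_append_perm (fun p : String × Int => decide (¬ (20 ≤ p.2 ∧ p.2 ≤ 40))) items
      rwa [hq] at h0
    have h2 := h1.map (fun nv : String × Int => (decide (20 ≤ nv.2 ∧ nv.2 ≤ 40), nv.1))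
    rw [List.map_append] at h2
    have e1 : (items.filter (fun p => decide (¬ (20 ≤ p.2 ∧ p.2 ≤ 40)))).map
        (fun nv : String × Int => (decide (20 ≤ nv.2 ∧ nv.2 ≤ 40), nv.1))
        = N1.map (fun n => (false, n)) := by
      rw [hN1, List.map_map]
      apply List.map_congr_left
      intro a ha
      have := (List.mem_filter.mp ha).2
      simp at this
      simp
      omega
    have e2 : (items.filter (fun p => decide (20 ≤ p.2 ∧ p.2 ≤ 40))).map
        (fun nv : String × Int => (decide (20 ≤ nv.2 ∧ nv.2 ≤ 40), nv.1))
        = N2.map (fun n => (true, n)) := by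
      rw [hN2, List.map_map]
      apply List.map_congr_left
      intro a ha
      have := (List.mem_filter.mp ha).2
      simp at this
      simp [this]
    rw [e1, e2] at h2
    have p1 := (PySem.List.sorted_perm (xs := N1) (key := fun x => x) (rev := false)).map
      (fun n => ((false : Bool), n))
    have p2 := (PySem.List.sorted_perm (xs := N2) (key := fun x => x) (rev := false)).map
      (fun n => ((true : Bool), n))
    exact ((p1.append p2).trans h2)
  · -- strictly increasing under toLex
    rw [List.pairwise_append]
    refine ⟨?_, ?_, ?_⟩
    · rw [List.pairwise_map]
      refine (two_teams_pairwise_lt N1 hnd1).imp ?_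
      intro a b hab
      exact Prod.Lex.toLex_lt_toLex.mpr (Or.inr ⟨rfl, hab⟩)
    · rw [List.pairwise_map]
      refine (two_teams_pairwise_lt N2 hnd2).imp ?_
      intro a b hab
      exact Prod.Lex.toLex_lt_toLex.mpr (Or.inr ⟨rfl, hab⟩)
    · intro x hx y hy
      obtain ⟨a, _, rfl⟩ := List.mem_map.mp hx
      obtain ⟨b, _, rfl⟩ := List.mem_map.mp hy
      exact Prod.Lex.toLex_lt_toLex.mpr (Or.inl (show (false : Bool) < (true : Bool) by decide))

-- ===== VERDICT =====
theorem two_teams_spec : Claim_equal_two_teams := by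
  intro sailors _
  unfold Spec_two_teams two_teams two_teams_alt
  dsimp only
  rw [two_teams_foldA (fun nv => 20 ≤ nv.2 ∧ nv.2 ≤ 40)]
  simp only [List.nil_append]
  set items := (PySem.Dict.ofList sailors).items with hitems
  have hnd : (items.map Prod.fst).Nodup := by
    have := PySem.Dict.nodup_keys_ofList sailors
    exact this
  rw [two_teams_sorted_tagged items hnd]
  set L1 := (PySem.List.sorted ((items.filter (fun p => decide (¬ (20 ≤ p.2 ∧ p.2 ≤ 40)))).map Prod.fst)
      (fun x => x) false).map (fun n => ((false : Bool), n)) with hL1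
  set L2 := (PySem.List.sorted ((items.filter (fun p => decide (20 ≤ p.2 ∧ p.2 ≤ 40))).map Prod.fst)
      (fun x => x) false).map (fun n => ((true : Bool), n)) with hL2
  have hfilter : (L1 ++ L2).filter (fun p => !p.1) = L1 := by
    rw [List.filter_append, hL1, hL2, List.filter_map, List.filter_map]
    simp [Function.comp_def]
  have hk : (((L1 ++ L2).filter (fun p => !p.1)).map (fun _ => (1 : Int))).sum
      = ((L1.length : Nat) : Int) := by
    rw [hfilter, PySem.List.sum_map_const_int, mul_one]
  rw [hk, PySem.List.slice_to_natCast, PySem.List.slice_from_natCast,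
      List.take_left, List.drop_left]
  rw [hL1, hL2, List.map_map, List.map_map]
  simp [Function.comp_def]
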